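-- pv_equiv track=rewrite | github.com/bretgourdie/weakness-subset | weakness-subset.py | getUsefulTypes
-- ===== SOURCE A (Python) =====
-- lAllTypes = ["normal",
--              "fire",
--              "fighting",
--              "water",
--              "flying",
--              "grass",
--              "poison",
--              "electric",
--              "ground",
--              "psychic",
--              "rock",
--              "ice",
--              "bug",
--              "dragon",
--              "ghost",
--              "dark",
--              "steel",
--              "fairy"]
--
-- def getUsefulTypes(dRankedWeaknessesByPoke):
--     lUsefulTypes = list(lAllTypes)
--
--     for sPoke, lTypes in dRankedWeaknessesByPoke.items():
--         for tScoreByType in lTypes: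
--             sType, iScore = tScoreByType
--
--             if iScore < 2 and sType in lUsefulTypes:
--                 lUsefulTypes.remove(sType)
--
--     return lUsefulTypes
-- ===== SOURCE B (Python) =====
-- lAllTypes = ["normal",
--              "fire",
--              "fighting",
--              "water",
--              "flying",
--              "grass",
--              "poison",
--              "electric",
--              "ground",
--              "psychic",
--              "rock",
--              "ice",
--              "bug",
--              "dragon",
--              "ghost",
--              "dark",
--              "steel",
--              "fairy"]
--
-- def getUsefulTypes(dRankedWeaknessesByPoke):
--     weak = {sType
--             for lTypes in dRankedWeaknessesByPoke.values()
--             for sType, iScore in lTypes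
--             if iScore < 2}
--     return [t for t in lAllTypes if t not in weak]
-- ===== Notes on version B (the rewrite author's own statement) =====
-- stated objective: simpler
-- what changed: Instead of mutating a copy of lAllTypes with guarded list.remove calls inside the nested loops, B first collects every weak type (score < 2) into a set in one pass and then filters the fixed lAllTypes list in a separate pass.
import Mathlib
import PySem

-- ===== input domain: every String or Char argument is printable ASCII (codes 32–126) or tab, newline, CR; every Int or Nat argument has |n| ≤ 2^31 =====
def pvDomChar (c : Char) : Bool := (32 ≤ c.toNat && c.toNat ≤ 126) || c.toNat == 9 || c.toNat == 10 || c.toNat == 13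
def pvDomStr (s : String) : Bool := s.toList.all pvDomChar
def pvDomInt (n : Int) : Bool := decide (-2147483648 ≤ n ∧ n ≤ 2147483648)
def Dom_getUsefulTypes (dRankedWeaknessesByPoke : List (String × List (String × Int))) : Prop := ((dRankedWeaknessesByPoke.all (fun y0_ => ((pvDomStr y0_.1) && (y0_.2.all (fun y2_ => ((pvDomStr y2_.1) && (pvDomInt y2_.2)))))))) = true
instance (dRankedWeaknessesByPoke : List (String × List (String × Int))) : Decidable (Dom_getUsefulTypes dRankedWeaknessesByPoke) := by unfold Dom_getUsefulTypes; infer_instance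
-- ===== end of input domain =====

-- B builds the set of weak types in one pass and then filters lAllTypes in a
-- second pass, instead of A's guarded in-place list.remove inside the nested loops (simpler).


-- module constant lAllTypes, shared by both versions
def lAllTypes : List String :=
  ["normal", "fire", "fighting", "water", "flying", "grass", "poison", "electric",
   "ground", "psychic", "rock", "ice", "bug", "dragon", "ghost", "dark", "steel", "fairy"]

-- ===== PORT A =====
-- nested for-loops over .items() / entries; guarded 'remove' (guard makes remove? succeed)
def getUsefulTypes (dRankedWeaknessesByPoke : List (String × List (String × Int))) : List String :=
  dRankedWeaknessesByPoke.foldl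
    (fun lUsefulTypes pair =>
      pair.2.foldl
        (fun lUsefulTypes tScoreByType =>
          if tScoreByType.2 < 2 && lUsefulTypes.contains tScoreByType.1 then
            (PySem.List.remove? lUsefulTypes tScoreByType.1).getD lUsefulTypes
          else lUsefulTypes)
        lUsefulTypes)
    lAllTypes

-- ===== PORT B =====
-- set comprehension = set of the generated elements; then a list-comprehension filter
def getUsefulTypes_alt (dRankedWeaknessesByPoke : List (String × List (String × Int))) : List String :=
  lAllTypes.filter (fun t =>
    !(PySem.Set.contains
        (PySem.Set.ofList
          ((((dRankedWeaknessesByPoke.map Prod.snd).flatten).filter (fun t => t.2 < 2)).map Prod.fst))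
        t))

-- ===== PRECONDITION & SPEC =====
def Spec_getUsefulTypes (dRankedWeaknessesByPoke : List (String × List (String × Int))) (out : List String) : Prop := out = getUsefulTypes_alt dRankedWeaknessesByPoke
instance (dRankedWeaknessesByPoke : List (String × List (String × Int))) (out : List String) : Decidable (Spec_getUsefulTypes dRankedWeaknessesByPoke out) := by unfold Spec_getUsefulTypes; infer_instance

-- ===== CLAIM (what is proved, stated in full; the proofs are below) =====
def Claim_equal_getUsefulTypes : Prop := ∀ (dRankedWeaknessesByPoke : List (String × List (String × Int))), Dom_getUsefulTypes dRankedWeaknessesByPoke → Spec_getUsefulTypes dRankedWeaknessesByPoke (getUsefulTypes dRankedWeaknessesByPoke)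

-- ===== LEMMAS AND PROOFS =====

-- the weak types contributed by a list of entries
def weakList (es : List (String × Int)) : List String :=
  (es.filter (fun t => t.2 < 2)).map Prod.fst

theorem weakList_cons (t : String × Int) (es : List (String × Int)) :
    weakList (t :: es) = if t.2 < 2 then t.1 :: weakList es else weakList es := by
  by_cases h : t.2 < 2
  · rw [if_pos h]; simp only [weakList, List.filter_cons, decide_eq_true h]; rfl
  · rw [if_neg h]; simp only [weakList, List.filter_cons, decide_eq_false h]; rfl

-- one step of A on a filtered nodup list stays a filter
theorem stepA_filter (l ws : List String) (hl : l.Nodup) (t : String × Int) :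
    (if t.2 < 2 && (l.filter (fun x => !decide (x ∈ ws))).contains t.1 then
        (PySem.List.remove? (l.filter (fun x => !decide (x ∈ ws))) t.1).getD
          (l.filter (fun x => !decide (x ∈ ws)))
      else l.filter (fun x => !decide (x ∈ ws)))
    = l.filter (fun x => !decide (x ∈ (if t.2 < 2 then t.1 :: ws else ws))) := by
  by_cases hs : t.2 < 2
  · simp only [hs, if_true, decide_true, Bool.true_and]
    by_cases hm : t.1 ∈ l.filter (fun x => !decide (x ∈ ws))
    · rw [if_pos (by simpa using hm),
        PySem.List.remove?_eq_some_erase _ _ hm, Option.getD_some,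
        (hl.filter _).erase_eq_filter]
      rw [List.filter_filter]
      apply List.filter_congr
      intro x _
      by_cases hx : x ∈ ws <;> by_cases he : x = t.1 <;> simp [hx, he]
    · rw [if_neg (by simpa using hm)]
      apply List.filter_congr
      intro x hx
      by_cases he : x = t.1
      · subst he
        by_cases hw : t.1 ∈ ws
        · simp [hw]
        · exact absurd (List.mem_filter.mpr ⟨hx, by simp [hw]⟩) hm
      · by_cases hw : x ∈ ws <;> simp [hw, he]
  · simp [hs]

-- main invariant: A's fold over entries keeps the state a filter of l by the weak set so far
theorem foldA_filter (es : List (String × Int)) (l ws : List String) (hl : l.Nodup) :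
    es.foldl
      (fun lUsefulTypes tScoreByType =>
        if tScoreByType.2 < 2 && lUsefulTypes.contains tScoreByType.1 then
          (PySem.List.remove? lUsefulTypes tScoreByType.1).getD lUsefulTypes
        else lUsefulTypes)
      (l.filter (fun x => !decide (x ∈ ws)))
    = l.filter (fun x => !decide (x ∈ ws ++ weakList es)) := by
  induction es generalizing ws with
  | nil => simp [weakList]
  | cons t es ih =>
    rw [List.foldl_cons, stepA_filter l ws hl t, weakList_cons]
    by_cases hs : t.2 < 2
    · rw [if_pos hs, if_pos hs, ih (t.1 :: ws)]
      apply List.filter_congr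
      intro x _
      by_cases h1 : x ∈ ws <;> by_cases h2 : x = t.1 <;> by_cases h3 : x ∈ weakList es <;>
        simp [h1, h2, h3]
    · rw [if_neg hs, if_neg hs, ih ws]

theorem lAllTypes_nodup : lAllTypes.Nodup := by decide

theorem getUsefulTypes_eq_alt (d : List (String × List (String × Int))) :
    getUsefulTypes d = getUsefulTypes_alt d := by
  unfold getUsefulTypes getUsefulTypes_alt
  have hA :
      d.foldl
        (fun lUsefulTypes pair =>
          pair.2.foldl
            (fun lUsefulTypes tScoreByType =>
              if tScoreByType.2 < 2 && lUsefulTypes.contains tScoreByType.1 then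
                (PySem.List.remove? lUsefulTypes tScoreByType.1).getD lUsefulTypes
              else lUsefulTypes)
            lUsefulTypes)
        lAllTypes
      = ((d.map Prod.snd).flatten).foldl
          (fun lUsefulTypes tScoreByType =>
            if tScoreByType.2 < 2 && lUsefulTypes.contains tScoreByType.1 then
              (PySem.List.remove? lUsefulTypes tScoreByType.1).getD lUsefulTypes
            else lUsefulTypes)
          lAllTypes := by
    rw [List.foldl_flatten, List.foldl_map]
  rw [hA,
    show lAllTypes = lAllTypes.filter (fun x => !decide (x ∈ ([] : List String))) by simp,
    foldA_filter _ _ _ lAllTypes_nodup]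
  apply List.filter_congr
  intro x _
  simp [weakList, PySem.Set.contains_eq_listContains, List.contains_eq_mem,
    PySem.Set.mem_ofList]

-- ===== VERDICT (by name: the statement is the Claim_ definition above) =====
theorem getUsefulTypes_spec : Claim_equal_getUsefulTypes := by
  intro d _
  exact getUsefulTypes_eq_alt d
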